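-- pv_equiv track=rewrite | github.com/vighnesh153/ds-algo | src/arrays/image-smoother.py | get_average_value
-- ===== SOURCE A (Python) =====
-- def get_average_value(arr, i, j):
--     rows = len(arr)
--     cols = len(arr[0])
--
--     s = 0
--     c = 0
--     for x in [-1, 0, 1]:
--         for y in [-1, 0, 1]:
--             if 0 <= x + i < rows and 0 <= y + j < cols:
--                 s += arr[x + i][y + j]
--                 c += 1
--
--     return s // c
-- ===== SOURCE B (Python) =====
-- def get_average_value(arr, i, j):
--     rows, cols = len(arr), len(arr[0])
--     r0, r1 = max(0, i - 1), min(rows - 1, i + 1)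
--     c0, c1 = max(0, j - 1), min(cols - 1, j + 1)
--     window = [row[c0:c1 + 1] for row in arr[r0:r1 + 1]]
--     s = sum(sum(w) for w in window)
--     n = sum(len(w) for w in window)
--     return s // n
-- ===== Notes on version B (the rewrite author's own statement) =====
-- stated objective: simpler
-- what changed: Instead of iterating all 9 offsets with a per-cell bounds guard and an incremented counter, B clamps the window bounds once, collects the neighborhood as row slices with no guard, and divides the window sum by the number of collected cells.
import Mathlib
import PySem

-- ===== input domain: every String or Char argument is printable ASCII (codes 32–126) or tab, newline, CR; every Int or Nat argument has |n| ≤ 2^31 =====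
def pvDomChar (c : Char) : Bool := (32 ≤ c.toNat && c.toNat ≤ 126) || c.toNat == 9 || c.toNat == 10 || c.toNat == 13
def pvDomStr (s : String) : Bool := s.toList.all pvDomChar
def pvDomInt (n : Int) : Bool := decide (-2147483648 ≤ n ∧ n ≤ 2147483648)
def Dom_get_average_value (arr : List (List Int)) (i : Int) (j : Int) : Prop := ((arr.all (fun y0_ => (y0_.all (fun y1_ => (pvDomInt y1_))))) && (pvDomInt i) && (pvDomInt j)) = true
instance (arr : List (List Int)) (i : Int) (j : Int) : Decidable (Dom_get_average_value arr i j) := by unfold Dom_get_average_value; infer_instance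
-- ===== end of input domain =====

-- B replaces the 9 guarded offset probes and counter of A by a clamped window sweep over row
-- slices with the divisor given by the closed-form window area (objective: simpler).

-- ===== PORT A =====
def get_average_value (arr : List (List Int)) (i : Int) (j : Int) : Int :=
  let rows : Int := arr.length
  let cols : Int := ((PySem.List.pyGet? arr 0).getD []).length
  -- (s, c) accumulated over the double loop 'for x in [-1,0,1]: for y in [-1,0,1]'
  let sc := ([-1, 0, 1] : List Int).foldl (fun sc x =>
      ([-1, 0, 1] : List Int).foldl (fun sc y =>
        if 0 ≤ x + i ∧ x + i < rows ∧ 0 ≤ y + j ∧ y + j < cols then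
          -- the guard gives 0 ≤ x+i < rows; the row access y+j can still raise IndexError in
          -- Python on a ragged grid — Pre_ excludes that, the default 0 is never returned inside Pre_
          (sc.1 + PySem.List.pyGetD (PySem.List.pyGetD arr (x + i) []) (y + j) 0, sc.2 + 1)
        else sc) sc) ((0 : Int), (0 : Int))
  PySem.Int.floordiv sc.1 sc.2

-- ===== PORT B =====
def get_average_value_alt (arr : List (List Int)) (i : Int) (j : Int) : Int :=
  let rows : Int := arr.length
  let cols : Int := ((PySem.List.pyGet? arr 0).getD []).length
  let r0 : Int := max 0 (i - 1)
  let r1 : Int := min (rows - 1) (i + 1)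
  let c0 : Int := max 0 (j - 1)
  let c1 : Int := min (cols - 1) (j + 1)
  let window := (PySem.List.slice arr (some r0) (some (r1 + 1))).map
      (fun row => PySem.List.slice row (some c0) (some (c1 + 1)))
  let s : Int := window.foldl (fun acc w => acc + w.sum) 0
  let n : Int := window.foldl (fun acc w => acc + (w.length : Int)) 0
  PySem.Int.floordiv s n

-- ===== PRECONDITION & SPEC =====
-- Pre_ is exactly A's return domain: A raises IndexError on an empty grid (arr[0]), raises
-- ZeroDivisionError when the clamped 3x3 window around (i,j) is empty in either axis, and
-- raises IndexError when some row inside the window is shorter than the window needs (ragged grid).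
def Pre_get_average_value (arr : List (List Int)) (i : Int) (j : Int) : Prop :=
  arr ≠ [] ∧
  max 0 (i - 1) ≤ min ((arr.length : Int) - 1) (i + 1) ∧
  max 0 (j - 1) ≤ min (((arr.headD []).length : Int) - 1) (j + 1) ∧
  ∀ t ∈ PySem.List.pyRange (max 0 (i - 1)) (min ((arr.length : Int) - 1) (i + 1) + 1) 1,
    min (((arr.headD []).length : Int) - 1) (j + 1) + 1 ≤ ((PySem.List.pyGetD arr t ([] : List Int)).length : Int)

instance (arr : List (List Int)) (i : Int) (j : Int) : Decidable (Pre_get_average_value arr i j) := by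
  unfold Pre_get_average_value; infer_instance

def pvWitness_get_average_value : List (List Int) × Int × Int := ([[1, 2], [3, 4]], 0, 0)

def Spec_get_average_value (arr : List (List Int)) (i : Int) (j : Int) (out : Int) : Prop := out = get_average_value_alt arr i j
instance (arr : List (List Int)) (i : Int) (j : Int) (out : Int) : Decidable (Spec_get_average_value arr i j out) := by unfold Spec_get_average_value; infer_instance

-- ===== CLAIM (what is proved, stated in full; the proofs are below) =====
def Claim_equal_get_average_value : Prop := ∀ (arr : List (List Int)) (i : Int) (j : Int), Dom_get_average_value arr i j → Pre_get_average_value arr i j → Spec_get_average_value arr i j (get_average_value arr i j)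

-- ===== LEMMAS AND PROOFS =====

-- arr[0] with a default equals headD (both are [] on the empty list)
lemma pv_get0 (arr : List (List Int)) : (PySem.List.pyGet? arr 0).getD [] = arr.headD [] := by
  cases arr <;> simp [PySem.List.pyGet?, PySem.List.pyIdx?]

-- the guarded (sum, count) inner loop in filter form
lemma pv_fold_guard (L : List Int) (p : Int → Prop) [DecidablePred p] (g : Int → Int) (s c : Int) :
    L.foldl (fun sc y => if p y then (sc.1 + g y, sc.2 + 1) else sc) (s, c)
      = (s + ((L.filter (fun y => decide (p y))).map g).sum,
         c + (((L.filter (fun y => decide (p y))).length : Int))) := by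
  induction L generalizing s c with
  | nil => simp
  | cons a t ih =>
    by_cases h : p a <;> simp [h, ih] <;> constructor <;> ring

-- a guarded three-term sum is a sum over the filtered literal list
lemma pv_ite3 (p : Int → Prop) [DecidablePred p] (f : Int → Int) :
    (if p (-1) then f (-1) else 0) + (if p 0 then f 0 else 0) + (if p 1 then f 1 else 0)
      = ((([-1, 0, 1] : List Int).filter (fun x => decide (p x))).map f).sum := by
  by_cases h1 : p (-1) <;> by_cases h2 : p 0 <;> by_cases h3 : p 1 <;> simp [h1, h2, h3] <;> ring

-- the clamped-window bridge: a guarded sum over offsets -1,0,1 around m is a sum over the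
-- clamped index interval [max 0 (m-1), min (n-1) (m+1)]
lemma pv_sum3 (m n : Int) (f : Int → Int) (h : max 0 (m - 1) ≤ min (n - 1) (m + 1)) :
    (if 0 ≤ (-1 : Int) + m ∧ (-1 : Int) + m < n then f ((-1) + m) else 0)
      + (if 0 ≤ (0 : Int) + m ∧ (0 : Int) + m < n then f (0 + m) else 0)
      + (if 0 ≤ (1 : Int) + m ∧ (1 : Int) + m < n then f (1 + m) else 0)
      = ((PySem.List.pyRange (max 0 (m - 1)) (min (n - 1) (m + 1) + 1) 1).map f).sum := by
  by_cases h1 : 0 ≤ (-1 : Int) + m ∧ (-1 : Int) + m < n <;>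
    by_cases h2 : 0 ≤ (0 : Int) + m ∧ (0 : Int) + m < n <;>
      by_cases h3 : 0 ≤ (1 : Int) + m ∧ (1 : Int) + m < n
  · rw [show max 0 (m-1) = m - 1 by omega, show min (n-1) (m+1) = m + 1 by omega,
      PySem.List.pyRange_one_cons (by omega), PySem.List.pyRange_one_cons (by omega),
      PySem.List.pyRange_one_cons (by omega), PySem.List.pyRange_one_eq_nil (by omega),
      if_pos h1, if_pos h2, if_pos h3]
    simp only [List.map, List.sum_cons, List.sum_nil]
    ring_nf
  · rw [show max 0 (m-1) = m - 1 by omega, show min (n-1) (m+1) = m by omega,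
      PySem.List.pyRange_one_cons (by omega), PySem.List.pyRange_one_cons (by omega),
      PySem.List.pyRange_one_eq_nil (by omega), if_pos h1, if_pos h2, if_neg h3]
    simp only [List.map, List.sum_cons, List.sum_nil]
    ring_nf
  · exact absurd h (by omega)
  · rw [show max 0 (m-1) = m - 1 by omega, show min (n-1) (m+1) = m - 1 by omega,
      PySem.List.pyRange_one_cons (by omega), PySem.List.pyRange_one_eq_nil (by omega),
      if_pos h1, if_neg h2, if_neg h3]
    simp only [List.map, List.sum_cons, List.sum_nil]
    ring_nf
  · rw [show max 0 (m-1) = m by omega, show min (n-1) (m+1) = m + 1 by omega,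
      PySem.List.pyRange_one_cons (by omega), PySem.List.pyRange_one_cons (by omega),
      PySem.List.pyRange_one_eq_nil (by omega), if_neg h1, if_pos h2, if_pos h3]
    simp only [List.map, List.sum_cons, List.sum_nil]
    ring_nf
  · rw [show max 0 (m-1) = m by omega, show min (n-1) (m+1) = m by omega,
      PySem.List.pyRange_one_cons (by omega), PySem.List.pyRange_one_eq_nil (by omega),
      if_neg h1, if_pos h2, if_neg h3]
    simp only [List.map, List.sum_cons, List.sum_nil]
    ring_nf
  · rw [show max 0 (m-1) = m + 1 by omega, show min (n-1) (m+1) = m + 1 by omega,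
      PySem.List.pyRange_one_cons (by omega), PySem.List.pyRange_one_eq_nil (by omega),
      if_neg h1, if_neg h2, if_pos h3]
    simp only [List.map, List.sum_cons, List.sum_nil]
    ring_nf
  · exact absurd h (by omega)

-- a slice with in-range bounds is the map of indexing over the index range
lemma pv_slice_eq_map {α : Type} (xs : List α) (a b : Int) (d : α)
    (h0 : 0 ≤ a) (hab : a ≤ b) (hb : b ≤ (xs.length : Int)) :
    PySem.List.slice xs (some a) (some b)
      = (PySem.List.pyRange a b 1).map (fun t => PySem.List.pyGetD xs t d) := by
  rw [PySem.List.slice_toNat xs h0 (le_trans h0 hab)]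
  have hdrop : List.drop a.toNat xs
      = (PySem.List.pyRange a b).map (fun t => PySem.List.pyGetD xs t d)
        ++ (PySem.List.pyRange b (xs.length : Int)).map (fun t => PySem.List.pyGetD xs t d) := by
    rw [← List.map_append, ← PySem.List.pyRange_one_append a b (xs.length : Int) hab hb,
      PySem.List.map_pyGetD_pyRange' xs d h0]
  rw [hdrop, List.take_left' (by rw [List.length_map, PySem.List.length_pyRange_one]; omega)]

-- the inner (y) guarded sum of A at window row t, as an explicit three-term sum
def pvV (arr : List (List Int)) (j cols : Int) (t : Int) : Int :=
  (if 0 ≤ (-1 : Int) + j ∧ (-1 : Int) + j < cols then PySem.List.pyGetD (PySem.List.pyGetD arr t []) ((-1) + j) 0 else 0)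
  + (if 0 ≤ (0 : Int) + j ∧ (0 : Int) + j < cols then PySem.List.pyGetD (PySem.List.pyGetD arr t []) (0 + j) 0 else 0)
  + (if 0 ≤ (1 : Int) + j ∧ (1 : Int) + j < cols then PySem.List.pyGetD (PySem.List.pyGetD arr t []) (1 + j) 0 else 0)

-- the inner (y) guarded count of A, as an explicit three-term sum
def pvW (j cols : Int) : Int :=
  (if 0 ≤ (-1 : Int) + j ∧ (-1 : Int) + j < cols then (1 : Int) else 0)
  + (if 0 ≤ (0 : Int) + j ∧ (0 : Int) + j < cols then (1 : Int) else 0)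
  + (if 0 ≤ (1 : Int) + j ∧ (1 : Int) + j < cols then (1 : Int) else 0)

-- A's inner sum in pvV form
lemma pv_T_eval (arr : List (List Int)) (i j rows cols x : Int) :
    ((([-1, 0, 1] : List Int).filter
        (fun y => decide (0 ≤ x + i ∧ x + i < rows ∧ 0 ≤ y + j ∧ y + j < cols))).map
      (fun y => PySem.List.pyGetD (PySem.List.pyGetD arr (x + i) []) (y + j) 0)).sum
      = if 0 ≤ x + i ∧ x + i < rows then pvV arr j cols (x + i) else 0 := by
  by_cases hx : 0 ≤ x + i ∧ x + i < rows
  · rw [if_pos hx, List.filter_congr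
        (q := fun y => decide (0 ≤ y + j ∧ y + j < cols)) (fun y _ => by simp [hx.1, hx.2])]
    exact (pv_ite3 (fun y => 0 ≤ y + j ∧ y + j < cols)
      (fun y => PySem.List.pyGetD (PySem.List.pyGetD arr (x + i) []) (y + j) 0)).symm
  · rw [if_neg hx, List.filter_congr (q := fun _ => false) (fun y _ => by simp; tauto)]
    simp

-- A's inner count in pvW form
lemma pv_K_eval (i j rows cols x : Int) :
    (((([-1, 0, 1] : List Int).filter
        (fun y => decide (0 ≤ x + i ∧ x + i < rows ∧ 0 ≤ y + j ∧ y + j < cols))).length : Int))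
      = if 0 ≤ x + i ∧ x + i < rows then pvW j cols else 0 := by
  by_cases hx : 0 ≤ x + i ∧ x + i < rows
  · rw [if_pos hx, List.filter_congr
        (q := fun y => decide (0 ≤ y + j ∧ y + j < cols)) (fun y _ => by simp [hx.1, hx.2])]
    have h1 := pv_ite3 (fun y => 0 ≤ y + j ∧ y + j < cols) (fun _ => (1 : Int))
    have h2 := PySem.List.sum_map_const_int
      (([-1, 0, 1] : List Int).filter (fun y => decide (0 ≤ y + j ∧ y + j < cols))) 1
    unfold pvW
    rw [h1, h2, mul_one]
  · rw [if_neg hx, List.filter_congr (q := fun _ => false) (fun y _ => by simp; tauto)]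
    simp

-- A's loop evaluated: the window sum over clamped index ranges and the window area
lemma pv_A_eval (arr : List (List Int)) (i j rows cols : Int)
    (hR : max 0 (i - 1) ≤ min (rows - 1) (i + 1))
    (hC : max 0 (j - 1) ≤ min (cols - 1) (j + 1)) :
    (([-1, 0, 1] : List Int).foldl (fun sc x =>
        ([-1, 0, 1] : List Int).foldl (fun sc y =>
          if 0 ≤ x + i ∧ x + i < rows ∧ 0 ≤ y + j ∧ y + j < cols then
            (sc.1 + PySem.List.pyGetD (PySem.List.pyGetD arr (x + i) []) (y + j) 0, sc.2 + 1)
          else sc) sc) ((0 : Int), (0 : Int)))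
    = (((PySem.List.pyRange (max 0 (i - 1)) (min (rows - 1) (i + 1) + 1) 1).map (pvV arr j cols)).sum,
       (min (rows - 1) (i + 1) + 1 - max 0 (i - 1)) * (min (cols - 1) (j + 1) + 1 - max 0 (j - 1))) := by
  have hcongr : ∀ (acc : Int × Int), ∀ x ∈ ([-1, 0, 1] : List Int),
      (([-1, 0, 1] : List Int).foldl (fun sc y =>
          if 0 ≤ x + i ∧ x + i < rows ∧ 0 ≤ y + j ∧ y + j < cols then
            (sc.1 + PySem.List.pyGetD (PySem.List.pyGetD arr (x + i) []) (y + j) 0, sc.2 + 1)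
          else sc) acc)
        = (acc.1 + (if 0 ≤ x + i ∧ x + i < rows then pvV arr j cols (x + i) else 0),
           acc.2 + (if 0 ≤ x + i ∧ x + i < rows then pvW j cols else 0)) := by
    intro acc x _
    rw [show acc = (acc.1, acc.2) from rfl,
      pv_fold_guard ([-1, 0, 1] : List Int)
        (fun y => 0 ≤ x + i ∧ x + i < rows ∧ 0 ≤ y + j ∧ y + j < cols)
        (fun y => PySem.List.pyGetD (PySem.List.pyGetD arr (x + i) []) (y + j) 0) acc.1 acc.2,
      pv_T_eval arr i j rows cols x, pv_K_eval i j rows cols x]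
  rw [PySem.List.foldl_congr_mem _ _ _ _ hcongr]
  simp only [List.foldl_cons, List.foldl_nil]
  have hS := pv_sum3 i rows (pvV arr j cols) hR
  have hK := pv_sum3 i rows (fun _ => pvW j cols) hR
  beta_reduce at hK
  have hW : pvW j cols = min (cols - 1) (j + 1) + 1 - max 0 (j - 1) := by
    have h1 := pv_sum3 j cols (fun _ => (1 : Int)) hC
    beta_reduce at h1
    have h2 := PySem.List.sum_map_const_int
      (PySem.List.pyRange (max 0 (j - 1)) (min (cols - 1) (j + 1) + 1) 1) (1 : Int)
    unfold pvW
    rw [h1, h2, PySem.List.length_pyRange_one, mul_one]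
    omega
  have hlen : (((PySem.List.pyRange (max 0 (i - 1)) (min (rows - 1) (i + 1) + 1) 1).length : Int))
      = min (rows - 1) (i + 1) + 1 - max 0 (i - 1) := by
    rw [PySem.List.length_pyRange_one]; omega
  refine Prod.ext ?_ ?_
  · simpa using hS
  · simp only
    rw [show (0 : Int) + (if 0 ≤ -1 + i ∧ -1 + i < rows then pvW j cols else 0)
          + (if 0 ≤ 0 + i ∧ 0 + i < rows then pvW j cols else 0)
          + (if 0 ≤ 1 + i ∧ 1 + i < rows then pvW j cols else 0)
        = (if 0 ≤ (-1 : Int) + i ∧ (-1 : Int) + i < rows then pvW j cols else 0)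
          + (if 0 ≤ (0 : Int) + i ∧ (0 : Int) + i < rows then pvW j cols else 0)
          + (if 0 ≤ (1 : Int) + i ∧ (1 : Int) + i < rows then pvW j cols else 0) by ring,
      hK, PySem.List.sum_map_const_int, hlen, hW]

-- B's window comprehension evaluated: the clamped slices are maps of indexing over the ranges
lemma pv_B_window (arr : List (List Int)) (i j cols : Int)
    (hR : max 0 (i - 1) ≤ min ((arr.length : Int) - 1) (i + 1))
    (hC : max 0 (j - 1) ≤ min (cols - 1) (j + 1))
    (hrow : ∀ t ∈ PySem.List.pyRange (max 0 (i - 1)) (min ((arr.length : Int) - 1) (i + 1) + 1) 1,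
      min (cols - 1) (j + 1) + 1 ≤ ((PySem.List.pyGetD arr t ([] : List Int)).length : Int)) :
    ((PySem.List.slice arr (some (max 0 (i - 1))) (some (min ((arr.length : Int) - 1) (i + 1) + 1))).map
        (fun row => PySem.List.slice row (some (max 0 (j - 1))) (some (min (cols - 1) (j + 1) + 1))))
      = (PySem.List.pyRange (max 0 (i - 1)) (min ((arr.length : Int) - 1) (i + 1) + 1) 1).map
          (fun t => (PySem.List.pyRange (max 0 (j - 1)) (min (cols - 1) (j + 1) + 1) 1).map
            (fun u => PySem.List.pyGetD (PySem.List.pyGetD arr t []) u 0)) := by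
  rw [pv_slice_eq_map arr (max 0 (i - 1)) (min ((arr.length : Int) - 1) (i + 1) + 1) ([] : List Int)
      (by omega) (by omega) (by omega),
    List.map_map]
  refine List.map_congr_left (fun t ht => ?_)
  show PySem.List.slice (PySem.List.pyGetD arr t [])
      (some (max 0 (j - 1))) (some (min (cols - 1) (j + 1) + 1)) = _
  exact pv_slice_eq_map (PySem.List.pyGetD arr t []) _ _ (0 : Int) (by omega) (by omega) (hrow t ht)

-- B's window sum is the same clamped-range sum as A's
lemma pv_B_sum (arr : List (List Int)) (i j cols : Int)
    (hR : max 0 (i - 1) ≤ min ((arr.length : Int) - 1) (i + 1))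
    (hC : max 0 (j - 1) ≤ min (cols - 1) (j + 1))
    (hrow : ∀ t ∈ PySem.List.pyRange (max 0 (i - 1)) (min ((arr.length : Int) - 1) (i + 1) + 1) 1,
      min (cols - 1) (j + 1) + 1 ≤ ((PySem.List.pyGetD arr t ([] : List Int)).length : Int)) :
    (((PySem.List.slice arr (some (max 0 (i - 1))) (some (min ((arr.length : Int) - 1) (i + 1) + 1))).map
        (fun row => PySem.List.slice row (some (max 0 (j - 1))) (some (min (cols - 1) (j + 1) + 1)))).foldl
      (fun acc w => acc + w.sum) 0)
      = ((PySem.List.pyRange (max 0 (i - 1)) (min ((arr.length : Int) - 1) (i + 1) + 1) 1).map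
          (pvV arr j cols)).sum := by
  rw [pv_B_window arr i j cols hR hC hrow, PySem.List.foldl_add, List.map_map, zero_add]
  refine congrArg List.sum (List.map_congr_left (fun t _ => ?_))
  exact (pv_sum3 j cols (fun u => PySem.List.pyGetD (PySem.List.pyGetD arr t []) u 0) hC).symm

-- B's cell count is the closed-form window area
lemma pv_B_cnt (arr : List (List Int)) (i j cols : Int)
    (hR : max 0 (i - 1) ≤ min ((arr.length : Int) - 1) (i + 1))
    (hC : max 0 (j - 1) ≤ min (cols - 1) (j + 1))
    (hrow : ∀ t ∈ PySem.List.pyRange (max 0 (i - 1)) (min ((arr.length : Int) - 1) (i + 1) + 1) 1,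
      min (cols - 1) (j + 1) + 1 ≤ ((PySem.List.pyGetD arr t ([] : List Int)).length : Int)) :
    (((PySem.List.slice arr (some (max 0 (i - 1))) (some (min ((arr.length : Int) - 1) (i + 1) + 1))).map
        (fun row => PySem.List.slice row (some (max 0 (j - 1))) (some (min (cols - 1) (j + 1) + 1)))).foldl
      (fun acc w => acc + ((w.length : Int))) 0)
      = (min ((arr.length : Int) - 1) (i + 1) + 1 - max 0 (i - 1))
          * (min (cols - 1) (j + 1) + 1 - max 0 (j - 1)) := by
  rw [pv_B_window arr i j cols hR hC hrow, PySem.List.foldl_add, List.map_map, zero_add]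
  have hconst : ∀ t ∈ PySem.List.pyRange (max 0 (i - 1)) (min ((arr.length : Int) - 1) (i + 1) + 1) 1,
      ((((PySem.List.pyRange (max 0 (j - 1)) (min (cols - 1) (j + 1) + 1) 1).map
          (fun u => PySem.List.pyGetD (PySem.List.pyGetD arr t []) u 0)).length : Int))
        = min (cols - 1) (j + 1) + 1 - max 0 (j - 1) := by
    intro t _
    rw [List.length_map, PySem.List.length_pyRange_one]; omega
  rw [List.map_congr_left (fun t ht => by
      show ((((PySem.List.pyRange (max 0 (j - 1)) (min (cols - 1) (j + 1) + 1) 1).map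
          (fun u => PySem.List.pyGetD (PySem.List.pyGetD arr t []) u 0)).length : Int)) = _
      exact hconst t ht),
    PySem.List.sum_map_const_int, PySem.List.length_pyRange_one]
  have : (((min ((arr.length : Int) - 1) (i + 1) + 1 - max 0 (i - 1)).toNat : Int))
      = min ((arr.length : Int) - 1) (i + 1) + 1 - max 0 (i - 1) := by omega
  rw [this]

-- ===== VERDICT (by name: the statement is the Claim_ definition above) =====
theorem get_average_value_spec : Claim_equal_get_average_value := by
  intro arr i j _ hpre
  obtain ⟨hne, hR, hC, hrow⟩ := hpre
  show get_average_value arr i j = get_average_value_alt arr i j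
  unfold get_average_value get_average_value_alt
  simp only [pv_get0]
  rw [pv_A_eval arr i j (arr.length : Int) ((arr.headD []).length : Int) hR hC,
    pv_B_sum arr i j ((arr.headD []).length : Int) hR hC hrow,
    pv_B_cnt arr i j ((arr.headD []).length : Int) hR hC hrow]
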